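-- pv_equiv track=rewrite | github.com/reposquirrel/Vizit | scripts/sample_jira.py | detect_team_field_keys
-- ===== SOURCE A (Python) =====
-- from typing import List, Dict, Any
--
-- def detect_team_field_keys(field_metadata: List[Dict[str, Any]]) -> List[str]:
--     candidates = []
--     for field in field_metadata:
--         field_id = field.get("id") or field.get("key")
--         if not field_id:
--             continue
--         name = (field.get("name") or "").strip()
--         lower = name.lower()
--         if "team" in lower or "squad" in lower:
--             if lower == "team":
--                 priority = 0
--             elif "owning" in lower or "assigned" in lower:
--                 priority = 1
--             else:
--                 priority = 2
--             candidates.append((priority, field_id))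
--     ordered_keys: List[str] = []
--     for _, field_id in sorted(candidates, key=lambda pair: pair[0]):
--         if field_id not in ordered_keys:
--             ordered_keys.append(field_id)
--     return ordered_keys
-- ===== SOURCE B (Python) =====
-- from typing import List, Dict, Any
--
-- def detect_team_field_keys(field_metadata: List[Dict[str, Any]]) -> List[str]:
--     p0: List[str] = []
--     p1: List[str] = []
--     p2: List[str] = []
--     for field in field_metadata:
--         field_id = field.get("id") or field.get("key")
--         if not field_id:
--             continue
--         lower = (field.get("name") or "").strip().lower()
--         if "team" not in lower and "squad" not in lower:
--             continue
--         if lower == "team":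
--             p0.append(field_id)
--         elif "owning" in lower or "assigned" in lower:
--             p1.append(field_id)
--         else:
--             p2.append(field_id)
--     return list(dict.fromkeys(p0 + p1 + p2))
-- ===== Notes on version B (the rewrite author's own statement) =====
-- stated objective: alternative
-- what changed: Replaces A's collect-(priority,id)-tuples-then-stable-sort-then-dedup pipeline with three priority buckets filled in one pass, concatenated p0+p1+p2, and a single global first-occurrence dedup (dict.fromkeys).
import Mathlib
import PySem

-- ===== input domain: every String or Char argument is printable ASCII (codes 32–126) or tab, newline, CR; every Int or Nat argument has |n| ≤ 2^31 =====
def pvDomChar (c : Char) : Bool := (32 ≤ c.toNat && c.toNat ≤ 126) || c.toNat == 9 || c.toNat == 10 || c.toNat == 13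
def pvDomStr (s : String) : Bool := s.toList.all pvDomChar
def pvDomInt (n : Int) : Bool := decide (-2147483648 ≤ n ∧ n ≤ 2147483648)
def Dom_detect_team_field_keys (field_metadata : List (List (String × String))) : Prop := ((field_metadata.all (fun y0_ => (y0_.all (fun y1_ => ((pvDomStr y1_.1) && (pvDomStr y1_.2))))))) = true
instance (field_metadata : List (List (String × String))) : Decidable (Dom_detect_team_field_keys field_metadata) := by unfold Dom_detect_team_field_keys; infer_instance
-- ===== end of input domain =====

-- B replaces A's collect-(priority,id)-pairs + stable sort with three priority buckets filled in
-- one pass and a single global first-occurrence dedup of their concatenation (objective: simpler).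

-- dict.get on the association list representing the Python dict (lookup = first match)
def pyDictGet (d : List (String × String)) (k : String) : Option String :=
  (d.find? (fun p => p.1 == k)).map Prod.snd

-- ===== PORT A =====
def detect_team_field_keys (field_metadata : List (List (String × String))) : List String :=
  let candidates : List (Int × String) :=
    field_metadata.foldl (fun cs field =>
      -- field_id = field.get("id") or field.get("key")  ('or' takes the second when the first is None or "")
      let field_id : Option String :=
        match pyDictGet field "id" with
        | some s => if s = "" then pyDictGet field "key" else some s
        | none => pyDictGet field "key"
      match field_id with
      | none => cs                         -- if not field_id: continue
      | some fid =>
        if fid = "" then cs                -- if not field_id: continue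
        else
          let name := PySem.Str.strip ((pyDictGet field "name").getD "")
          let lower := PySem.Str.lower name
          if PySem.Str.isIn "team" lower || PySem.Str.isIn "squad" lower then
            let priority : Int :=
              if lower = "team" then 0
              else if PySem.Str.isIn "owning" lower || PySem.Str.isIn "assigned" lower then 1
              else 2
            cs ++ [(priority, fid)]
          else cs) []
  (PySem.List.sorted candidates (fun pair => pair.1) false).foldl
    (fun ordered_keys pr => if ordered_keys.contains pr.2 then ordered_keys else ordered_keys ++ [pr.2]) []

-- ===== PORT B =====
def detect_team_field_keys_alt (field_metadata : List (List (String × String))) : List String :=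
  let buckets : List String × List String × List String :=
    field_metadata.foldl (fun b field =>
      let field_id : Option String :=
        match pyDictGet field "id" with
        | some s => if s = "" then pyDictGet field "key" else some s
        | none => pyDictGet field "key"
      match field_id with
      | none => b
      | some fid =>
        if fid = "" then b
        else
          let lower := PySem.Str.lower (PySem.Str.strip ((pyDictGet field "name").getD ""))
          if !(PySem.Str.isIn "team" lower) && !(PySem.Str.isIn "squad" lower) then b
          else if lower = "team" then (b.1 ++ [fid], b.2.1, b.2.2)
          else if PySem.Str.isIn "owning" lower || PySem.Str.isIn "assigned" lower then
            (b.1, b.2.1 ++ [fid], b.2.2)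
          else (b.1, b.2.1, b.2.2 ++ [fid])) ([], [], [])
  PySem.List.dedup (buckets.1 ++ buckets.2.1 ++ buckets.2.2)

-- ===== PRECONDITION & SPEC =====
def Spec_detect_team_field_keys (field_metadata : List (List (String × String))) (out : List String) : Prop := out = detect_team_field_keys_alt field_metadata
instance (field_metadata : List (List (String × String))) (out : List String) : Decidable (Spec_detect_team_field_keys field_metadata out) := by unfold Spec_detect_team_field_keys; infer_instance

-- ===== CLAIM (what is proved, stated in full; the proofs are below) =====
def Claim_equal_detect_team_field_keys : Prop := ∀ (field_metadata : List (List (String × String))), Dom_detect_team_field_keys field_metadata → Spec_detect_team_field_keys field_metadata (detect_team_field_keys field_metadata)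

-- ===== LEMMAS AND PROOFS =====

-- classification of one field, shared shape of both ports' loop bodies (proof-side only)
def pvClassify (field : List (String × String)) : Option (Int × String) :=
  let field_id : Option String :=
    match pyDictGet field "id" with
    | some s => if s = "" then pyDictGet field "key" else some s
    | none => pyDictGet field "key"
  match field_id with
  | none => none
  | some fid =>
    if fid = "" then none
    else
      let lower := PySem.Str.lower (PySem.Str.strip ((pyDictGet field "name").getD ""))
      if PySem.Str.isIn "team" lower || PySem.Str.isIn "squad" lower then
        some (if lower = "team" then 0
              else if PySem.Str.isIn "owning" lower || PySem.Str.isIn "assigned" lower then 1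
              else 2, fid)
      else none

def pvCand (fm : List (List (String × String))) : List (Int × String) :=
  fm.flatMap (fun f => (pvClassify f).toList)

lemma pvClassify_prio (f : List (String × String)) (p : Int × String)
    (h : pvClassify f = some p) : p.1 = 0 ∨ p.1 = 1 ∨ p.1 = 2 := by
  unfold pvClassify at h
  simp only at h
  split at h
  · exact absurd h (by simp)
  · split_ifs at h with h1 h2 h3 h4 <;>
      (simp only [Option.some.injEq] at h; rw [← h]; simp)

lemma pvCand_prio (fm : List (List (String × String))) :
    ∀ p ∈ pvCand fm, p.1 = 0 ∨ p.1 = 1 ∨ p.1 = 2 := by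
  intro p hp
  unfold pvCand at hp
  simp only [List.mem_flatMap, Option.mem_toList] at hp
  obtain ⟨f, _, hf⟩ := hp
  exact pvClassify_prio f p hf

-- A's candidate-building fold computes pvCand
lemma a_fold_eq (fm : List (List (String × String))) :
    ∀ cs : List (Int × String),
    fm.foldl (fun cs field =>
      let field_id : Option String :=
        match pyDictGet field "id" with
        | some s => if s = "" then pyDictGet field "key" else some s
        | none => pyDictGet field "key"
      match field_id with
      | none => cs
      | some fid =>
        if fid = "" then cs
        else
          let name := PySem.Str.strip ((pyDictGet field "name").getD "")
          let lower := PySem.Str.lower name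
          if PySem.Str.isIn "team" lower || PySem.Str.isIn "squad" lower then
            let priority : Int :=
              if lower = "team" then 0
              else if PySem.Str.isIn "owning" lower || PySem.Str.isIn "assigned" lower then 1
              else 2
            cs ++ [(priority, fid)]
          else cs) cs = cs ++ pvCand fm := by
  induction fm with
  | nil => intro cs; simp [pvCand]
  | cons f t ih =>
    intro cs
    simp only [List.foldl_cons]
    rw [ih]
    have : pvCand (f :: t) = (pvClassify f).toList ++ pvCand t := by
      simp [pvCand]
    rw [this]
    unfold pvClassify
    simp only
    split
    · simp
    · split_ifs <;> simp

-- B's bucket fold computes the per-priority projections of pvCand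
def pvProj (i : Int) (c : List (Int × String)) : List String :=
  (c.filter (fun p => p.1 == i)).map Prod.snd

lemma b_fold_eq (fm : List (List (String × String))) :
    ∀ b : List String × List String × List String,
    fm.foldl (fun b field =>
      let field_id : Option String :=
        match pyDictGet field "id" with
        | some s => if s = "" then pyDictGet field "key" else some s
        | none => pyDictGet field "key"
      match field_id with
      | none => b
      | some fid =>
        if fid = "" then b
        else
          let lower := PySem.Str.lower (PySem.Str.strip ((pyDictGet field "name").getD ""))
          if !(PySem.Str.isIn "team" lower) && !(PySem.Str.isIn "squad" lower) then b
          else if lower = "team" then (b.1 ++ [fid], b.2.1, b.2.2)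
          else if PySem.Str.isIn "owning" lower || PySem.Str.isIn "assigned" lower then
            (b.1, b.2.1 ++ [fid], b.2.2)
          else (b.1, b.2.1, b.2.2 ++ [fid])) b
    = (b.1 ++ pvProj 0 (pvCand fm), b.2.1 ++ pvProj 1 (pvCand fm), b.2.2 ++ pvProj 2 (pvCand fm)) := by
  induction fm with
  | nil => intro b; simp [pvCand, pvProj]
  | cons f t ih =>
    intro b
    simp only [List.foldl_cons]
    rw [ih]
    have hc : pvCand (f :: t) = (pvClassify f).toList ++ pvCand t := by simp [pvCand]
    rw [hc]
    unfold pvClassify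
    simp only
    split
    · simp [pvProj]
    · split_ifs with h1 h2 h3 h4 <;> simp_all [pvProj]

-- insertBy passes over a block whose elements it does not go before
lemma insertBy_append {α : Type} (before : α → α → Bool) (x : α) (f g : List α)
    (h : ∀ y ∈ f, before x y = false) :
    PySem.List.insertBy before x (f ++ g) = f ++ PySem.List.insertBy before x g := by
  induction f with
  | nil => simp
  | cons a t ih =>
    simp only [List.cons_append, PySem.List.insertBy]
    rw [h a (by simp)]
    simp only [ih (fun y hy => h y (by simp [hy]))]
    rfl

lemma insertBy_cons_all {α : Type} (before : α → α → Bool) (x : α) (l : List α)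
    (h : ∀ y ∈ l, before x y = true) :
    PySem.List.insertBy before x l = x :: l := by
  cases l with
  | nil => rfl
  | cons a t => simp [PySem.List.insertBy, h a (by simp)]

-- the stable insertion-sort fold keeps the three priority blocks in order
lemma sort_inv (l : List (Int × String)) :
    ∀ (f0 f1 f2 : List (Int × String)),
    (∀ p ∈ l, p.1 = 0 ∨ p.1 = 1 ∨ p.1 = 2) →
    (∀ p ∈ f0, p.1 = 0) → (∀ p ∈ f1, p.1 = 1) → (∀ p ∈ f2, p.1 = 2) →
    l.foldl (fun acc x =>
        PySem.List.insertBy (fun a b => decide ((fun pair : Int × String => pair.1) a < (fun pair : Int × String => pair.1) b)) x acc)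
      (f0 ++ f1 ++ f2)
    = (f0 ++ l.filter (fun p => p.1 == 0)) ++ (f1 ++ l.filter (fun p => p.1 == 1)) ++ (f2 ++ l.filter (fun p => p.1 == 2)) := by
  induction l with
  | nil => intro f0 f1 f2 _ _ _ _; simp
  | cons x t ih =>
    intro f0 f1 f2 hl h0 h1 h2
    simp only [List.foldl_cons]
    rcases hl x (by simp) with hx | hx | hx
    · have hins : PySem.List.insertBy (fun a b => decide ((fun pair : Int × String => pair.1) a < (fun pair : Int × String => pair.1) b)) x (f0 ++ f1 ++ f2)
          = (f0 ++ [x]) ++ f1 ++ f2 := by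
        rw [List.append_assoc, insertBy_append _ _ _ _ (fun y hy => by simp [h0 y hy, hx]),
          insertBy_cons_all _ _ _ (fun y hy => by
            rcases List.mem_append.mp hy with hy | hy
            · simp [h1 y hy, hx]
            · simp [h2 y hy, hx])]
        simp
      rw [hins, ih (f0 ++ [x]) f1 f2 (fun p hp => hl p (by simp [hp])) (fun p hp => by
          rcases List.mem_append.mp hp with hp | hp
          · exact h0 p hp
          · simp at hp; simp [hp, hx]) h1 h2]
      simp [hx]
    · have hins : PySem.List.insertBy (fun a b => decide ((fun pair : Int × String => pair.1) a < (fun pair : Int × String => pair.1) b)) x (f0 ++ f1 ++ f2)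
          = f0 ++ (f1 ++ [x]) ++ f2 := by
        rw [insertBy_append _ _ _ _ (fun y hy => by
            rcases List.mem_append.mp hy with hy | hy
            · simp [h0 y hy, hx]
            · simp [h1 y hy, hx]),
          insertBy_cons_all _ _ _ (fun y hy => by simp [h2 y hy, hx])]
        simp
      rw [hins, ih f0 (f1 ++ [x]) f2 (fun p hp => hl p (by simp [hp])) h0 (fun p hp => by
          rcases List.mem_append.mp hp with hp | hp
          · exact h1 p hp
          · simp at hp; simp [hp, hx]) h2]
      simp [hx]
    · have hins : PySem.List.insertBy (fun a b => decide ((fun pair : Int × String => pair.1) a < (fun pair : Int × String => pair.1) b)) x (f0 ++ f1 ++ f2)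
          = f0 ++ f1 ++ (f2 ++ [x]) := by
        rw [PySem.List.insertBy_of_forall_not_before _ _ _ (fun y hy => by
            rcases List.mem_append.mp hy with hy | hy
            · rcases List.mem_append.mp hy with hy | hy
              · simp [h0 y hy, hx]
              · simp [h1 y hy, hx]
            · simp [h2 y hy, hx])]
        simp
      rw [hins, ih f0 f1 (f2 ++ [x]) (fun p hp => hl p (by simp [hp])) h0 h1 (fun p hp => by
          rcases List.mem_append.mp hp with hp | hp
          · exact h2 p hp
          · simp at hp; simp [hp, hx])]
      simp [hx]

lemma sorted_three (c : List (Int × String)) (h : ∀ p ∈ c, p.1 = 0 ∨ p.1 = 1 ∨ p.1 = 2) :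
    PySem.List.sorted c (fun pair => pair.1) false
      = c.filter (fun p => p.1 == 0) ++ c.filter (fun p => p.1 == 1) ++ c.filter (fun p => p.1 == 2) := by
  rw [PySem.List.sorted_eq_foldl_insertBy]
  have := sort_inv c [] [] [] h (by simp) (by simp) (by simp)
  simpa using this

-- A's dedup fold over pairs is the ordered-dedup of the seconds
lemma dedup_fold (l : List (Int × String)) :
    l.foldl (fun ordered_keys pr => if ordered_keys.contains pr.2 then ordered_keys else ordered_keys ++ [pr.2]) []
      = PySem.Set.ofList (l.map Prod.snd) := by
  rw [PySem.Set.ofList_eq_foldl, List.foldl_map]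
  rfl

lemma map_snd_filter (i : Int) (c : List (Int × String)) :
    (c.filter (fun p => p.1 == i)).map Prod.snd = pvProj i c := rfl

-- ===== VERDICT (by name: the statement is the Claim_ definition above) =====
theorem detect_team_field_keys_spec : Claim_equal_detect_team_field_keys := by
  intro fm _
  unfold Spec_detect_team_field_keys detect_team_field_keys detect_team_field_keys_alt
  rw [a_fold_eq fm [], b_fold_eq fm ([], [], [])]
  simp only [List.nil_append]
  rw [sorted_three (pvCand fm) (pvCand_prio fm), dedup_fold]
  simp only [List.map_append, map_snd_filter]
  rfl
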